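-- pv_equiv track=rewrite | github.com/DragunWF/Competitive-Programming | CodeWars/python/6_kyu/vowel_shifting.py | vowel_shift
-- ===== SOURCE A (Python) =====
-- def vowel_shift(text: str, n: int) -> str:
--     if not text or n == 0:
--         return text
--
--     VOWELS = "aeiouAEIOU"
--     vowel_indicies = []
--     vowel_characters = []
--     for i, char in enumerate(text):
--         if char in VOWELS:
--             vowel_indicies.append(i)
--             vowel_characters.append(char)
--
--     output = [*text]
--     shifted_vowel_characters = shift_list(vowel_characters, n)
--     for i in range(len(shifted_vowel_characters)):
--         output[vowel_indicies[i]] = shifted_vowel_characters[i]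
--     return "".join(output)
--
-- def shift_list(vowel_list: list[str], n: int) -> list[str]:
--     LIST_LENGTH = len(vowel_list)
--     output = ["" for i in range(LIST_LENGTH)]
--     for i in range(LIST_LENGTH):
--         output[(i + n) % LIST_LENGTH] = vowel_list[i]
--     return output
-- ===== SOURCE B (Python) =====
-- VOWELS = "aeiouAEIOU"
--
-- def _reverse_vowels(chars, i, j):
--     # classic two-pointer in-place reversal of the vowels lying in chars[i..j]
--     while i < j:
--         if chars[i] not in VOWELS:
--             i += 1
--         elif chars[j] not in VOWELS:
--             j -= 1
--         else:
--             chars[i], chars[j] = chars[j], chars[i]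
--             i += 1
--             j -= 1
--
-- def vowel_shift(text: str, n: int) -> str:
--     if not text or n == 0:
--         return text
--     total = 0
--     for c in text:
--         if c in VOWELS:
--             total += 1
--     if total == 0:
--         return text
--     k = n % total
--     if k == 0:
--         return text
--     chars = list(text)
--     # rotate the vowel subsequence right by k with three in-place reversals
--     _reverse_vowels(chars, 0, len(chars) - 1)
--     seen = 0
--     m = 0
--     while seen < k:          # m ends just past the k-th vowel
--         if chars[m] in VOWELS:
--             seen += 1
--         m += 1
--     _reverse_vowels(chars, 0, m - 1)
--     _reverse_vowels(chars, m, len(chars) - 1)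
--     return "".join(chars)
-- ===== Notes on version B (the rewrite author's own statement) =====
-- stated objective: alternative
-- what changed: B rotates the vowel subsequence in place with the classic three-reversal rotation (two-pointer vowel-skipping swap passes over the char array, plus a vowel-counting scan to locate the split point), instead of A's collect-indices-and-vowels / build-a-shifted-copy / write-back-by-index passes; no auxiliary vowel or index list is built.
import Mathlib
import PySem

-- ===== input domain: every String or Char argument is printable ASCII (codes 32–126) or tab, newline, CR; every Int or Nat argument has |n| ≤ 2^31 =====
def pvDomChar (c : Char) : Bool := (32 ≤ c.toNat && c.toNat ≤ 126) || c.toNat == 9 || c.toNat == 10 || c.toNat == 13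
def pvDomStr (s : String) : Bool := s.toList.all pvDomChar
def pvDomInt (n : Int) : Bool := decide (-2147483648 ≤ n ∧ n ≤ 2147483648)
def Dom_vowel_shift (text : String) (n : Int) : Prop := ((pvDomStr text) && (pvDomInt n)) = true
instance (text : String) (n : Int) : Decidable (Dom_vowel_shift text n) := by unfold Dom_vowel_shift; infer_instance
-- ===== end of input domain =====

-- B rotates the vowels in place with the classic three-reversal rotation (two-pointer
-- vowel reversals over the char array, plus a counting scan), instead of A's
-- extract-the-vowels / build-a-shifted-copy / write-back passes; objective: alternative.

-- ===== PORT A =====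
-- 'char in "aeiouAEIOU"' (membership of a single char in the vowel string)
def pvIsVowel (c : Char) : Bool := "aeiouAEIOU".toList.contains c

-- port of shift_list; Python initialises output with "" placeholders, ported as the
-- placeholder char ' ' (when the list is nonempty every slot is overwritten exactly once,
-- and for the empty list the loop body never runs), and output[(i+n) % L] = v[i] uses
-- Python's % (PySem.Int.mod), whose result lies in [0, L) here, hence the .toNat is exact.
def shift_list (vowel_list : List Char) (n : Int) : List Char :=
  let LIST_LENGTH := vowel_list.length
  let output := List.replicate LIST_LENGTH ' '
  (List.range LIST_LENGTH).foldl
    (fun out (i : Nat) =>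
      out.set ((PySem.Int.mod ((i : Int) + n) (LIST_LENGTH : Int)).toNat)
        (vowel_list.getD i ' '))
    output

def vowel_shift (text : String) (n : Int) : String :=
  if text.toList = [] ∨ n = 0 then text
  else
    -- the enumerate loop appending (index, char) for vowels; A keeps the two lists
    -- vowel_indicies / vowel_characters, recovered below as the two projections
    let pairs := (PySem.List.enumerate text.toList).foldl
      (fun acc p => if pvIsVowel p.2 then acc ++ [p] else acc) []
    let vowel_indicies := pairs.map (·.1)
    let vowel_characters := pairs.map (·.2)
    let output := text.toList
    let shifted_vowel_characters := shift_list vowel_characters n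
    -- output[vowel_indicies[i]] = shifted[i]; indices come from enumerate at start 0,
    -- so they are nonnegative and .toNat is exact
    let out := (List.range shifted_vowel_characters.length).foldl
      (fun o (i : Nat) => o.set ((vowel_indicies.getD i 0).toNat)
        (shifted_vowel_characters.getD i ' ')) output
    String.ofList out

-- ===== PORT B =====
-- _reverse_vowels: the two-pointer in-place reversal of the vowels lying in chars[i..j].
-- In B the pointers i, j and the scan index m never leave [0, len) and chars[i]/chars[j]
-- are always in range, so Nat indices and getD are exact here.
def pvRevVowels (cs : List Char) (i j : Nat) : List Char :=
  if h : i < j then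
    if ¬ pvIsVowel (cs.getD i ' ') then pvRevVowels cs (i + 1) j
    else if ¬ pvIsVowel (cs.getD j ' ') then pvRevVowels cs i (j - 1)
    else pvRevVowels ((cs.set i (cs.getD j ' ')).set j (cs.getD i ' ')) (i + 1) (j - 1)
  else cs
termination_by j - i
decreasing_by all_goals omega

-- the 'while seen < k: … m += 1' scan over chars[m:], ported structurally over the list
-- tail (Python would raise IndexError on an exhausted list; B only calls it with
-- k ≤ number of vowels, where the scan always stops inside the list)
def pvFindM (k : Nat) : List Char → Nat → Nat → Nat
  | [], _seen, m => m
  | c :: rest, seen, m =>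
    if seen < k then pvFindM k rest (if pvIsVowel c then seen + 1 else seen) (m + 1)
    else m

def vowel_shift_alt (text : String) (n : Int) : String :=
  if text.toList = [] ∨ n = 0 then text
  else
    -- total: the counting loop (a bare counter, Python int ≥ 0, exact as Nat)
    let total := text.toList.foldl (fun a c => if pvIsVowel c then a + 1 else a) (0 : Nat)
    if total = 0 then text
    else
      -- k = n % total lies in [0, total), so .toNat is exact
      let k := (PySem.Int.mod n (total : Int)).toNat
      if k = 0 then text
      else
        let chars := text.toList
        let len := chars.length
        let c1 := pvRevVowels chars 0 (len - 1)
        let m := pvFindM k c1 0 0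
        let c2 := pvRevVowels c1 0 (m - 1)
        let c3 := pvRevVowels c2 m (len - 1)
        String.ofList c3

-- ===== PRECONDITION & SPEC =====
def Spec_vowel_shift (text : String) (n : Int) (out : String) : Prop := out = vowel_shift_alt text n
instance (text : String) (n : Int) (out : String) : Decidable (Spec_vowel_shift text n out) := by unfold Spec_vowel_shift; infer_instance

-- ===== CLAIM (what is proved, stated in full; the proofs are below) =====
def Claim_equal_vowel_shift : Prop := ∀ (text : String) (n : Int), Dom_vowel_shift text n → Spec_vowel_shift text n (vowel_shift text n)

-- ===== LEMMAS AND PROOFS =====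

-- writing list r back at the vowel positions of cs (proof-side device relating both ports)
def pvRebuild : List Char → List Char → List Char
  | [], _ => []
  | c :: cs, rot =>
    if pvIsVowel c then rot.headD ' ' :: pvRebuild cs rot.tail
    else c :: pvRebuild cs rot

-- reversing the vowel subsequence of a window, as a list operation
def pvRevW (w : List Char) : List Char := pvRebuild w ((w.filter pvIsVowel).reverse)

theorem length_pvRebuild (cs : List Char) : ∀ r, (pvRebuild cs r).length = cs.length := by
  induction cs with
  | nil => intro r; rfl
  | cons c cs ih => intro r; by_cases h : pvIsVowel c = true <;> simp [pvRebuild, h, ih]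

theorem pvRebuild_append (xs ys : List Char) : ∀ r,
    pvRebuild (xs ++ ys) r
      = pvRebuild xs r ++ pvRebuild ys (r.drop (xs.filter pvIsVowel).length) := by
  induction xs with
  | nil => intro r; simp [pvRebuild]
  | cons c xs ih =>
    intro r
    by_cases h : pvIsVowel c = true
    · simp only [List.cons_append, pvRebuild, h, if_pos, List.filter_cons_of_pos h,
        List.length_cons, ih]
      congr 2
      rw [Nat.add_comm, ← List.drop_drop, List.drop_one]
    · simp [pvRebuild, h, List.filter_cons_of_neg, ih]

theorem pvRebuild_prefix (xs : List Char) : ∀ r s, (xs.filter pvIsVowel).length ≤ r.length →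
    pvRebuild xs (r ++ s) = pvRebuild xs r := by
  induction xs with
  | nil => intro r s _; rfl
  | cons c xs ih =>
    intro r s hle
    by_cases h : pvIsVowel c = true
    · cases r with
      | nil => simp [List.filter_cons_of_pos h] at hle
      | cons a r' =>
        simp only [pvRebuild, h, if_pos, List.cons_append, List.headD_cons, List.tail_cons]
        rw [ih r' s (by simpa [List.filter_cons_of_pos h] using hle)]
    · have h2 := ih r s (by simpa [List.filter_cons_of_neg h] using hle)
      simp [pvRebuild, h, h2]

theorem filter_pvRebuild (cs : List Char) : ∀ r, r.length = (cs.filter pvIsVowel).length →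
    (∀ c ∈ r, pvIsVowel c = true) → (pvRebuild cs r).filter pvIsVowel = r := by
  induction cs with
  | nil =>
    intro r hlen _
    simp only [List.filter_nil, List.length_nil] at hlen
    have : r = [] := List.length_eq_zero_iff.mp hlen
    simp [pvRebuild, this]
  | cons c cs ih =>
    intro r hlen hall
    by_cases h : pvIsVowel c = true
    · cases r with
      | nil => simp [List.filter_cons_of_pos h] at hlen
      | cons a r' =>
        have ha : pvIsVowel a = true := hall a (by simp)
        simp only [pvRebuild, h, if_pos, List.headD_cons, List.tail_cons,
          List.filter_cons_of_pos ha]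
        rw [ih r' (by simpa [List.filter_cons_of_pos h] using hlen)
          (fun x hx => hall x (by simp [hx]))]
    · simp only [Bool.not_eq_true] at h
      simp only [pvRebuild, h, Bool.false_eq_true, if_false, List.filter_cons, h]
      exact ih r (by simpa [List.filter_cons, h] using hlen) hall

theorem pvRebuild_pvRebuild (cs : List Char) : ∀ r r', r.length = (cs.filter pvIsVowel).length →
    (∀ c ∈ r, pvIsVowel c = true) → pvRebuild (pvRebuild cs r) r' = pvRebuild cs r' := by
  induction cs with
  | nil => intro r r' _ _; rfl
  | cons c cs ih =>
    intro r r' hlen hall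
    by_cases h : pvIsVowel c = true
    · cases r with
      | nil => simp [List.filter_cons_of_pos h] at hlen
      | cons a r'' =>
        have ha : pvIsVowel a = true := hall a (by simp)
        simp only [pvRebuild, h, if_pos, List.headD_cons, List.tail_cons, ha]
        rw [ih r'' r'.tail (by simpa [List.filter_cons_of_pos h] using hlen)
          (fun x hx => hall x (by simp [hx]))]
    · simp only [Bool.not_eq_true] at h
      simp only [pvRebuild, h, Bool.false_eq_true, if_false]
      rw [ih r r' (by simpa [List.filter_cons, h] using hlen) hall]

theorem pvRebuild_self (cs : List Char) : pvRebuild cs (cs.filter pvIsVowel) = cs := by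
  induction cs with
  | nil => rfl
  | cons c cs ih =>
    by_cases h : pvIsVowel c = true <;>
      simp [pvRebuild, h, List.filter_cons_of_pos, List.filter_cons_of_neg, ih]

theorem pvRevW_short (w : List Char) (h : w.length ≤ 1) : pvRevW w = w := by
  match w, h with
  | [], _ => rfl
  | [c], _ =>
    by_cases hc : pvIsVowel c = true <;>
      simp [pvRevW, pvRebuild, List.filter_cons, List.filter_nil, hc]

theorem pvRevW_cons_cons (c : Char) (w' : List Char) (h : pvIsVowel c = false) :
    pvRevW (c :: w') = c :: pvRevW w' := by
  simp [pvRevW, pvRebuild, List.filter_cons, h]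

theorem pvRevW_snoc_cons (w₀ : List Char) (d : Char) (h : pvIsVowel d = false) :
    pvRevW (w₀ ++ [d]) = pvRevW w₀ ++ [d] := by
  have hf : (w₀ ++ [d]).filter pvIsVowel = w₀.filter pvIsVowel := by
    simp [List.filter_append, List.filter_cons, h]
  rw [pvRevW, hf, pvRebuild_append]
  simp [pvRevW, pvRebuild, h]

theorem pvRevW_both (c : Char) (mid : List Char) (d : Char)
    (hc : pvIsVowel c = true) (hd : pvIsVowel d = true) :
    pvRevW (c :: (mid ++ [d])) = d :: (pvRevW mid ++ [c]) := by
  have hf : (c :: (mid ++ [d])).filter pvIsVowel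
      = c :: (mid.filter pvIsVowel ++ [d]) := by
    simp [List.filter_cons, List.filter_append, hc, hd]
  rw [pvRevW, hf]
  have hrev : (c :: (mid.filter pvIsVowel ++ [d])).reverse
      = (d :: (mid.filter pvIsVowel).reverse ++ [c]) := by simp
  rw [hrev]
  show pvRebuild (c :: (mid ++ [d])) (d :: ((mid.filter pvIsVowel).reverse ++ [c])) = _
  simp only [pvRebuild, hc, if_pos, List.headD_cons, List.tail_cons]
  rw [pvRebuild_append]
  have hdrop : ((mid.filter pvIsVowel).reverse ++ [c]).drop (mid.filter pvIsVowel).length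
      = [c] := by
    have : (mid.filter pvIsVowel).reverse.length = (mid.filter pvIsVowel).length := by simp
    rw [← this, List.drop_left]
  rw [hdrop, pvRebuild_prefix mid _ [c] (by simp)]
  simp [pvRevW, pvRebuild, hd]

theorem getD_append_length (A : List Char) (c : Char) (X : List Char) :
    (A ++ c :: X).getD A.length ' ' = c := by simp [List.getD]

theorem set_append_length (A : List Char) (c v : Char) (X : List Char) :
    (A ++ c :: X).set A.length v = A ++ v :: X := by
  induction A with
  | nil => rfl
  | cons a A ih => simp [ih]

-- the two-pointer loop on window [A.length, A.length + w.length - 1] reverses exactly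
-- the vowel subsequence of w
theorem rvLoop_window (N : Nat) : ∀ (w A B : List Char), w.length ≤ N →
    pvRevVowels (A ++ w ++ B) A.length (A.length + w.length - 1) = A ++ pvRevW w ++ B := by
  induction N with
  | zero =>
    intro w A B hw
    have hnil : w = [] := List.length_eq_zero_iff.mp (by omega)
    subst hnil
    rw [pvRevVowels, dif_neg (by simp only [List.length_nil]; omega)]
    simp [pvRevW, pvRebuild]
  | succ N ih =>
    intro w A B hw
    by_cases h1 : w.length ≤ 1
    · rw [pvRevVowels, dif_neg (by omega), pvRevW_short w h1]
    · obtain ⟨c, w', rfl⟩ : ∃ c w', w = c :: w' := by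
        cases w with
        | nil => simp at h1
        | cons c w' => exact ⟨c, w', rfl⟩
      simp only [List.length_cons, not_le] at h1
      have hij : A.length < A.length + (c :: w').length - 1 := by
        simp only [List.length_cons]; omega
      rw [pvRevVowels, dif_pos hij]
      have hgi : (A ++ (c :: w') ++ B).getD A.length ' ' = c := by
        have h := getD_append_length A c (w' ++ B)
        simpa using h
      rw [hgi]
      by_cases hc : pvIsVowel c = true
      · rw [if_neg (by simp [hc])]
        -- head is a vowel: look at the last element d of the window
        obtain ⟨mid, d, rfl⟩ : ∃ mid d, w' = mid ++ [d] := by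
          cases w' with
          | nil => simp at h1
          | cons x xs =>
            exact ⟨(x :: xs).dropLast, (x :: xs).getLast (by simp),
              (List.dropLast_concat_getLast (by simp)).symm⟩
        have hgj : (A ++ (c :: (mid ++ [d])) ++ B).getD
            (A.length + (c :: (mid ++ [d])).length - 1) ' ' = d := by
          have hform : A ++ (c :: (mid ++ [d])) ++ B = (A ++ c :: mid) ++ d :: B := by simp
          have hlen : A.length + (c :: (mid ++ [d])).length - 1 = (A ++ c :: mid).length := by
            simp only [List.length_append, List.length_cons, List.length_nil]
            omega
          rw [hform, hlen, getD_append_length]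
        rw [hgj]
        by_cases hd : pvIsVowel d = true
        · -- both ends vowels: swap and recurse on the interior
          rw [if_neg (by simp [hd])]
          have hset : ((A ++ (c :: (mid ++ [d])) ++ B).set A.length d).set
              (A.length + (c :: (mid ++ [d])).length - 1) c
              = (A ++ [d]) ++ mid ++ ([c] ++ B) := by
            have e0 : A ++ (c :: (mid ++ [d])) ++ B = A ++ c :: (mid ++ d :: B) := by simp
            rw [e0, set_append_length]
            have e1 : A ++ d :: (mid ++ d :: B) = (A ++ d :: mid) ++ d :: B := by simp
            have hlen2 : A.length + (c :: (mid ++ [d])).length - 1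
                = (A ++ d :: mid).length := by simp only [List.length_append, List.length_cons, List.length_nil]; omega
            rw [e1, hlen2, set_append_length]
            simp
          rw [hset]
          have e1 : A.length + 1 = (A ++ [d]).length := by simp
          have e3 : A.length + (c :: (mid ++ [d])).length - 1 - 1
              = (A ++ [d]).length + mid.length - 1 := by simp only [List.length_append, List.length_cons, List.length_nil]; omega
          rw [e1, e3, ih mid (A ++ [d]) ([c] ++ B) (by simp at hw ⊢; omega)]
          rw [pvRevW_both c mid d hc hd]
          simp
        · -- last is a consonant: shrink the window from the right
          rw [if_pos (by simp [hd])]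
          have hform : A ++ (c :: (mid ++ [d])) ++ B = A ++ (c :: mid) ++ ([d] ++ B) := by
            simp
          have hj1 : A.length + (c :: (mid ++ [d])).length - 1 - 1
              = A.length + (c :: mid).length - 1 := by simp only [List.length_append, List.length_cons, List.length_nil]; omega
          rw [hform, hj1, ih (c :: mid) A ([d] ++ B) (by simp at hw ⊢; omega)]
          have hsnoc : pvRevW (c :: (mid ++ [d])) = pvRevW (c :: mid) ++ [d] := by
            have := pvRevW_snoc_cons (c :: mid) d (by simpa using hd)
            simpa using this
          rw [hsnoc]
          simp
      · -- head is a consonant: shrink the window from the left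
        rw [if_pos (by simp [hc])]
        have e2 : A ++ (c :: w') ++ B = (A ++ [c]) ++ w' ++ B := by simp
        have e1 : A.length + 1 = (A ++ [c]).length := by simp
        have e3 : A.length + (c :: w').length - 1 = (A ++ [c]).length + w'.length - 1 := by
          simp only [List.length_append, List.length_cons, List.length_nil]; omega
        rw [e2, e1, e3, ih w' (A ++ [c]) B (by simp at hw ⊢; omega)]
        rw [pvRevW_cons_cons c w' (by simpa using hc)]
        simp

theorem pvFindM_spec (k : Nat) : ∀ (cs : List Char) (seen m : Nat), seen ≤ k →
    k ≤ seen + (cs.filter pvIsVowel).length →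
    ∃ d, pvFindM k cs seen m = m + d ∧ d ≤ cs.length ∧
      seen + ((cs.take d).filter pvIsVowel).length = k ∧ (seen < k → 1 ≤ d) := by
  intro cs
  induction cs with
  | nil =>
    intro seen m hle hub
    simp only [List.filter_nil, List.length_nil, Nat.add_zero] at hub
    refine ⟨0, rfl, by simp, by simpa using (by omega : seen = k).symm ▸ rfl, by omega⟩
  | cons c rest ih =>
    intro seen m hle hub
    by_cases hsk : seen < k
    · simp only [pvFindM, if_pos hsk]
      by_cases h : pvIsVowel c = true
      · obtain ⟨d', h1, h2, h3, _⟩ := ih (seen + 1) (m + 1)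
          (by omega) (by simp [List.filter_cons, h] at hub ⊢; omega)
        refine ⟨d' + 1, by simp [h, h1]; omega, by simpa using h2, ?_, by omega⟩
        simp [List.take_succ_cons, List.filter_cons, h] at h3 ⊢
        omega
      · obtain ⟨d', h1, h2, h3, _⟩ := ih seen (m + 1)
          (by omega) (by simpa [List.filter_cons, h] using hub)
        refine ⟨d' + 1, by simp [h, h1]; omega, by simpa using h2, ?_, by omega⟩
        simp [List.take_succ_cons, List.filter_cons, h] at h3 ⊢
        omega
    · simp only [pvFindM, if_neg hsk]
      exact ⟨0, rfl, by simp, by simpa using by omega, by omega⟩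

theorem count_foldl (cs : List Char) : ∀ a : Nat,
    cs.foldl (fun a c => if pvIsVowel c then a + 1 else a) a = a + (cs.filter pvIsVowel).length := by
  induction cs with
  | nil => intro a; simp
  | cons c cs ih =>
    intro a
    by_cases h : pvIsVowel c = true <;>
      simp [List.filter_cons, h, ih] <;> omega

-- ===== A-side machinery (characterising port A as a rebuild with a rotated vowel list) =====

-- the A-side collection loop is a filter over the enumeration
theorem pairs_eq_aux (l : List (Int × Char)) :
    ∀ acc, l.foldl (fun acc p => if pvIsVowel p.2 then acc ++ [p] else acc) acc
      = acc ++ l.filter (fun p => pvIsVowel p.2) := by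
  induction l with
  | nil => simp
  | cons q l ih =>
    intro acc
    by_cases h : pvIsVowel q.2 = true <;> simp [h, ih]

-- second projection of the filtered enumeration = plain filter
theorem map_snd_filter_enumerate (cs : List Char) (s : Int) :
    (((PySem.List.enumerate cs s).filter (fun p => pvIsVowel p.2)).map (·.2))
      = cs.filter pvIsVowel := by
  induction cs generalizing s with
  | nil => simp [PySem.List.enumerate_nil]
  | cons c cs ih =>
    by_cases h : pvIsVowel c = true <;>
      simp [PySem.List.enumerate_cons, h, ih]

-- range-indexed fold with getD = fold over the zip (lengths equal)
theorem range_fold_zip (b : List Char) :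
    ∀ (a : List Int) (init : List Char), a.length = b.length →
    (List.range b.length).foldl
        (fun o (i : Nat) => o.set ((a.getD i 0).toNat) (b.getD i ' ')) init
      = (a.zip b).foldl (fun o p => o.set p.1.toNat p.2) init := by
  induction b with
  | nil => intro a init h; simp
  | cons x b ih =>
    intro a init h
    cases a with
    | nil => simp at h
    | cons y a =>
      simp only [List.length_cons, List.range_succ_eq_map, List.foldl_cons,
        List.foldl_map, List.zip_cons_cons, List.getD_cons_zero]
      have := ih a (init.set y.toNat x) (by simpa using h)
      simpa using this

-- a fold of sets at indices all ≥ s+1 (shifted by s) leaves the head alone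
theorem fold_set_cons (s : Int) (ps : List (Int × Char)) :
    ∀ (c : Char) (l : List Char), (∀ p ∈ ps, s + 1 ≤ p.1) →
    ps.foldl (fun o p => o.set (p.1 - s).toNat p.2) (c :: l)
      = c :: ps.foldl (fun o p => o.set (p.1 - (s+1)).toNat p.2) l := by
  induction ps with
  | nil => intro c l _; rfl
  | cons q ps ih =>
    intro c l hmem
    have hq : s + 1 ≤ q.1 := hmem q (by simp)
    have h1 : (q.1 - s).toNat = (q.1 - (s+1)).toNat + 1 := by omega
    simp only [List.foldl_cons, h1, List.set]
    exact ih c (l.set (q.1 - (s+1)).toNat q.2) (fun p hp => hmem p (by simp [hp]))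

-- indices produced by enumerate at start s are ≥ s
theorem fst_mem_enumerate_ge (cs : List Char) (s : Int) (q : Int × Char)
    (hq : q ∈ (PySem.List.enumerate cs s).filter (fun p => pvIsVowel p.2)) : s ≤ q.1 := by
  have hq' : q ∈ PySem.List.enumerate cs s := (List.mem_filter.mp hq).1
  rw [PySem.List.mem_enumerate_iff] at hq'
  obtain ⟨k, hk, rfl⟩ := hq'
  simp

-- elements of the zipped index list are ≥ s
theorem zip_fst_ge (cs : List Char) (s : Int) (r : List Char) (p : Int × Char)
    (hp : p ∈ ((((PySem.List.enumerate cs s).filter (fun q => pvIsVowel q.2)).map (·.1)).zip r)) :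
    s ≤ p.1 := by
  obtain ⟨a, b⟩ := p
  have h1 := (List.of_mem_zip hp).1
  simp only [List.mem_map] at h1
  obtain ⟨q, hq, hq1⟩ := h1
  have := fst_mem_enumerate_ge cs s q hq
  simp only at hq1 ⊢
  omega

-- write-back of r at the vowel positions of cs = rebuild
theorem writeback_eq_rebuild (cs : List Char) :
    ∀ (s : Int) (r : List Char), r.length = (cs.filter pvIsVowel).length →
    (((((PySem.List.enumerate cs s).filter (fun p => pvIsVowel p.2)).map (·.1)).zip r).foldl
        (fun o p => o.set (p.1 - s).toNat p.2) cs)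
      = pvRebuild cs r := by
  induction cs with
  | nil => intro s r h; simp [PySem.List.enumerate_nil, pvRebuild]
  | cons c cs ih =>
    intro s r hlen
    rw [PySem.List.enumerate_cons]
    by_cases h : pvIsVowel c = true
    · obtain ⟨r0, r', rfl⟩ : ∃ r0 r', r = r0 :: r' := by
        cases r with
        | nil => exfalso; simp [List.filter_cons, h] at hlen
        | cons r0 r' => exact ⟨r0, r', rfl⟩
      simp only [List.filter_cons, h, if_pos, List.map_cons, List.zip_cons_cons,
        List.foldl_cons]
      have h0 : (s - s).toNat = 0 := by omega
      rw [h0]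
      simp only [List.set]
      rw [fold_set_cons s _ r0 cs (fun p hp => zip_fst_ge cs (s+1) r' p hp)]
      rw [ih (s+1) r' (by simpa [List.filter_cons, h] using hlen)]
      simp [pvRebuild, h]
    · simp only [List.filter_cons, h, Bool.false_eq_true, if_false]
      rw [fold_set_cons s _ c cs (fun p hp => zip_fst_ge cs (s+1) r p hp)]
      rw [ih (s+1) r (by simpa [List.filter_cons, h] using hlen)]
      simp [pvRebuild, h]

-- length of a fold of sets equals the initial length
theorem length_foldl_set (l : List Nat) (f : Nat → Nat) (g : Nat → Char) :
    ∀ init : List Char,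
      (l.foldl (fun o i => o.set (f i) (g i)) init).length = init.length := by
  induction l with
  | nil => intro init; rfl
  | cons i l ih => intro init; simp [ih, List.length_set]

-- fold functions equal on members give equal folds
theorem foldl_congr_mem'' {α β : Type} (l : List α) (f g : β → α → β) :
    ∀ init, (∀ b : β, ∀ a ∈ l, f b a = g b a) → l.foldl f init = l.foldl g init := by
  induction l with
  | nil => intro init _; rfl
  | cons a l ih =>
    intro init h
    simp only [List.foldl_cons, h init a (by simp)]
    exact ih _ (fun b a' ha' => h b a' (by simp [ha']))

-- bounded description of (m + k) % L
theorem mod_add_cases (L k m : Nat) (hk : k ≤ L) (hm : m < L) :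
    (m + k) % L = if m + k < L then m + k else m + k - L := by
  split_ifs with h
  · exact Nat.mod_eq_of_lt h
  · rw [Nat.mod_eq_sub_mod (by omega)]
    exact Nat.mod_eq_of_lt (by omega)

-- inversion of the index map i ↦ (i + k) % L
theorem mod_inv_fact (L k j m : Nat) (hk : k < L) (hj : j < L) (hm : m < L) :
    ((m + k) % L = j ↔ (j + (L - k)) % L = m) := by
  rw [mod_add_cases L k m (by omega) hm, mod_add_cases L (L - k) j (by omega) hj]
  split_ifs with h1 h2 h2 <;> omega

-- pointwise value of the shift_list fold
theorem fold_set_range_getElem (L k : Nat) (v : List Char) (hk : k < L) :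
    ∀ (m : Nat), m ≤ L → ∀ j, j < L →
    ((List.range m).foldl (fun o (i : Nat) => o.set ((i + k) % L) (v.getD i ' '))
        (List.replicate L ' '))[j]?
      = if (j + (L - k)) % L < m then some (v.getD ((j + (L - k)) % L) ' ') else some ' ' := by
  intro m
  induction m with
  | zero =>
    intro _ j hj
    simp [hj]
  | succ m ih =>
    intro hm j hj
    rw [List.range_succ, List.foldl_append, List.foldl_cons, List.foldl_nil]
    have hlen : ((List.range m).foldl
        (fun o (i : Nat) => o.set ((i + k) % L) (v.getD i ' '))
        (List.replicate L ' ')).length = L := by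
      simpa using length_foldl_set (List.range m) (fun i => (i + k) % L)
        (fun i => v.getD i ' ') (List.replicate L ' ')
    by_cases he : (m + k) % L = j
    · have hm' : (j + (L - k)) % L = m := (mod_inv_fact L k j m hk hj (by omega)).mp he
      rw [he, List.getElem?_set_self (by rw [hlen]; omega)]
      rw [hm', if_pos (Nat.lt_succ_self m)]
    · rw [List.getElem?_set_ne he, ih (by omega) j hj]
      have hne : (j + (L - k)) % L ≠ m := fun h =>
        he ((mod_inv_fact L k j m hk hj (by omega)).mpr h)
      by_cases hlt : (j + (L - k)) % L < m
      · simp [hlt, Nat.lt_succ_of_lt hlt]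
      · have h2 : ¬ (j + (L - k)) % L < m + 1 := by omega
        simp [hlt, h2]

-- shift_list is rotation by k = n mod L (slicing form), for nonempty v
theorem shift_list_eq_rotate (v : List Char) (n : Int) (hv : v ≠ []) :
    shift_list v n
      = v.drop (v.length - (PySem.Int.mod n (v.length : Int)).toNat)
          ++ v.take (v.length - (PySem.Int.mod n (v.length : Int)).toNat) := by
  have hLpos : 0 < v.length := List.length_pos_iff.mpr hv
  have hLZ : (0 : Int) < (v.length : Int) := by exact_mod_cast hLpos
  have hmod : PySem.Int.mod n (v.length : Int) = n % (v.length : Int) :=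
    PySem.Int.mod_eq_emod_of_pos hLZ
  have hnn : 0 ≤ n % (v.length : Int) := Int.emod_nonneg n (by omega)
  have hlt : n % (v.length : Int) < (v.length : Int) := Int.emod_lt_of_pos n hLZ
  have hklt : (PySem.Int.mod n (v.length : Int)).toNat < v.length := by
    rw [hmod]; omega
  have hfun : ∀ (o : List Char), ∀ i ∈ List.range v.length,
      o.set ((PySem.Int.mod ((i : Int) + n) (v.length : Int)).toNat) (v.getD i ' ')
        = o.set ((i + (PySem.Int.mod n (v.length : Int)).toNat) % v.length) (v.getD i ' ') := by
    intro o i hi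
    have hiL : i < v.length := List.mem_range.mp hi
    congr 1
    rw [PySem.Int.mod_eq_emod_of_pos hLZ]
    have e2 : ((i : Int) + n) % (v.length : Int)
        = ((i : Int) % (v.length : Int) + n % (v.length : Int)) % (v.length : Int) :=
      Int.add_emod _ _ _
    have e3 : (i : Int) % (v.length : Int) = (i : Int) :=
      Int.emod_eq_of_lt (by positivity) (by exact_mod_cast hiL)
    have e4 : n % (v.length : Int) = ((PySem.Int.mod n (v.length : Int)).toNat : Int) := by
      rw [hmod]; omega
    rw [e2, e3, e4]
    have e5 : ((i : Int) + ((PySem.Int.mod n (v.length : Int)).toNat : Int))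
        = (((i + (PySem.Int.mod n (v.length : Int)).toNat : Nat) : Int)) := by push_cast; ring
    rw [e5, ← Int.natCast_mod]
    omega
  unfold shift_list
  simp only []
  rw [foldl_congr_mem'' (List.range v.length) _ _ (List.replicate v.length ' ') hfun]
  apply List.ext_getElem?
  intro j
  by_cases hj : j < v.length
  · rw [fold_set_range_getElem v.length ((PySem.Int.mod n (v.length : Int)).toNat) v hklt
      v.length (le_refl _) j hj]
    rw [if_pos (Nat.mod_lt _ hLpos)]
    rw [List.getElem?_append]
    have hdl : (v.drop (v.length - (PySem.Int.mod n (v.length : Int)).toNat)).length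
        = (PySem.Int.mod n (v.length : Int)).toNat := by
      simp; omega
    by_cases hjk : j < (PySem.Int.mod n (v.length : Int)).toNat
    · rw [if_pos (by omega), List.getElem?_drop]
      have hi0 : (j + (v.length - (PySem.Int.mod n (v.length : Int)).toNat)) % v.length
          = (v.length - (PySem.Int.mod n (v.length : Int)).toNat) + j := by
        rw [Nat.mod_eq_of_lt (by omega)]; omega
      rw [hi0, List.getD_eq_getElem v ' ' (by omega), List.getElem?_eq_getElem (by omega)]
    · rw [if_neg (by omega), List.getElem?_take]
      rw [if_pos (by simp [hdl]; omega)]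
      have hi0 : (j + (v.length - (PySem.Int.mod n (v.length : Int)).toNat)) % v.length
          = j - (PySem.Int.mod n (v.length : Int)).toNat := by
        rw [mod_add_cases v.length _ j (by omega) hj]
        split_ifs <;> omega
      rw [hi0, List.getD_eq_getElem v ' ' (by omega), List.getElem?_eq_getElem (by omega)]
      simp only [hdl]
  · rw [List.getElem?_eq_none, List.getElem?_eq_none]
    · simp; omega
    · have := length_foldl_set (List.range v.length)
        (fun i => (i + (PySem.Int.mod n (v.length : Int)).toNat) % v.length)
        (fun i => v.getD i ' ') (List.replicate v.length ' ')
      simp only [this, List.length_replicate]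
      omega

-- port A, on the non-early-return branch, is rebuild with the rotated vowel list
theorem A_eq_rebuild (text : String) (n : Int) (h0 : ¬ (text.toList = [] ∨ n = 0))
    (hv : text.toList.filter pvIsVowel ≠ []) :
    vowel_shift text n
      = String.ofList (pvRebuild text.toList
          ((text.toList.filter pvIsVowel).drop
              ((text.toList.filter pvIsVowel).length
                - (PySem.Int.mod n ((text.toList.filter pvIsVowel).length : Int)).toNat)
            ++ (text.toList.filter pvIsVowel).take
              ((text.toList.filter pvIsVowel).length
                - (PySem.Int.mod n ((text.toList.filter pvIsVowel).length : Int)).toNat))) := by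
  unfold vowel_shift
  rw [if_neg h0]
  have hpairs := pairs_eq_aux (PySem.List.enumerate text.toList) []
  rw [List.nil_append] at hpairs
  simp only [hpairs, List.map_map]
  have hsnd : (((PySem.List.enumerate text.toList).filter
      (fun p => pvIsVowel p.2)).map (·.2)) = text.toList.filter pvIsVowel :=
    map_snd_filter_enumerate text.toList 0
  simp only [hsnd]
  rw [shift_list_eq_rotate _ n hv]
  have hflen : ((PySem.List.enumerate text.toList).filter
      (fun p => pvIsVowel p.2)).length = (text.toList.filter pvIsVowel).length := by
    rw [← hsnd, List.length_map]
  have hrlen : ((text.toList.filter pvIsVowel).drop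
        ((text.toList.filter pvIsVowel).length
          - (PySem.Int.mod n ((text.toList.filter pvIsVowel).length : Int)).toNat)
      ++ (text.toList.filter pvIsVowel).take
        ((text.toList.filter pvIsVowel).length
          - (PySem.Int.mod n ((text.toList.filter pvIsVowel).length : Int)).toNat)).length
      = (text.toList.filter pvIsVowel).length := by
    simp only [List.length_append, List.length_drop, List.length_take]
    omega
  rw [range_fold_zip _ _ _ (by rw [hrlen, List.length_map, hflen])]
  have hfe : (fun (o : List Char) (p : Int × Char) => o.set p.1.toNat p.2)
      = (fun (o : List Char) (p : Int × Char) => o.set (p.1 - (0 : Int)).toNat p.2) := by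
    funext o p; simp
  rw [hfe, writeback_eq_rebuild text.toList 0 _ hrlen]

theorem A_novowel (text : String) (n : Int) (h0 : ¬ (text.toList = [] ∨ n = 0))
    (hv : text.toList.filter pvIsVowel = []) : vowel_shift text n = text := by
  have hp : (PySem.List.enumerate text.toList).filter (fun p => pvIsVowel p.2) = [] := by
    have h2 := map_snd_filter_enumerate text.toList 0
    rw [hv] at h2
    exact List.map_eq_nil_iff.mp h2
  unfold vowel_shift
  rw [if_neg h0]
  simp [pairs_eq_aux, hp, shift_list]

-- B, on the main branch, equals rebuild with the three-reversal-rotated vowel list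
theorem B_eq_rebuild (text : String) (n : Int) (h0 : ¬ (text.toList = [] ∨ n = 0))
    (hv : text.toList.filter pvIsVowel ≠ [])
    (hk : (PySem.Int.mod n ((text.toList.filter pvIsVowel).length : Int)).toNat ≠ 0) :
    vowel_shift_alt text n
      = String.ofList (pvRebuild text.toList
          ((text.toList.filter pvIsVowel).drop
              ((text.toList.filter pvIsVowel).length
                - (PySem.Int.mod n ((text.toList.filter pvIsVowel).length : Int)).toNat)
            ++ (text.toList.filter pvIsVowel).take
              ((text.toList.filter pvIsVowel).length
                - (PySem.Int.mod n ((text.toList.filter pvIsVowel).length : Int)).toNat))) := by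
  have hcs0 : text.toList ≠ [] := fun h => h0 (Or.inl h)
  set cs0 := text.toList with hcs0_def
  set v := cs0.filter pvIsVowel with hv_def
  set L := v.length with hL_def
  set k := (PySem.Int.mod n (L : Int)).toNat with hk_def
  have hLpos : 0 < L := List.length_pos_iff.mpr hv
  have hkL : k < L := by
    have hLZ : (0 : Int) < (L : Int) := by exact_mod_cast hLpos
    have hmod : PySem.Int.mod n (L : Int) = n % (L : Int) :=
      PySem.Int.mod_eq_emod_of_pos hLZ
    have := Int.emod_lt_of_pos n hLZ
    have := Int.emod_nonneg n (by omega : (L : Int) ≠ 0)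
    rw [hk_def, hmod]; omega
  have htot : cs0.foldl (fun a c => if pvIsVowel c then a + 1 else a) 0 = L := by
    simpa using count_foldl cs0 0
  have hall_v : ∀ c ∈ v, pvIsVowel c = true := fun c hc => (List.mem_filter.mp hc).2
  -- step 1: full two-pointer pass reverses the vowel subsequence
  have h1 : pvRevVowels cs0 0 (cs0.length - 1) = pvRebuild cs0 v.reverse := by
    have := rvLoop_window cs0.length cs0 [] [] (le_refl _)
    simpa [pvRevW] using this
  set c1 := pvRebuild cs0 v.reverse with hc1_def
  have hfc1 : c1.filter pvIsVowel = v.reverse :=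
    filter_pvRebuild cs0 v.reverse (by rw [List.length_reverse, hv_def])
      (fun c hc => hall_v c (List.mem_reverse.mp hc))
  have hlen1 : c1.length = cs0.length := length_pvRebuild cs0 v.reverse
  -- step 2: the counting scan stops after exactly k vowels
  obtain ⟨d, hm_eq, hdN, hcnt, hd1⟩ := pvFindM_spec k c1 0 0 (by omega)
    (by rw [hfc1]; simp only [List.length_reverse]; omega)
  have hklen : ((c1.take d).filter pvIsVowel).length = k := by omega
  have hsplit : (c1.take d).filter pvIsVowel ++ (c1.drop d).filter pvIsVowel = v.reverse := by
    rw [← List.filter_append, List.take_append_drop, hfc1]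
  have hftake : (c1.take d).filter pvIsVowel = v.reverse.take k := by
    rw [← hsplit, ← hklen, List.take_left]
  have hfdrop : (c1.drop d).filter pvIsVowel = v.reverse.drop k := by
    rw [← hsplit, ← hklen, List.drop_left]
  have htdlen : (c1.take d).length = d := by
    rw [List.length_take]; omega
  -- step 3: the two window passes reverse each part
  have h2 : pvRevVowels c1 0 (d - 1) = pvRevW (c1.take d) ++ c1.drop d := by
    have := rvLoop_window c1.length (c1.take d) [] (c1.drop d) (by simp)
    simpa [htdlen, List.take_append_drop] using this
  have hlen2 : (pvRevW (c1.take d)).length = d := by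
    rw [pvRevW, length_pvRebuild, htdlen]
  have h3 : pvRevVowels (pvRevW (c1.take d) ++ c1.drop d) d (cs0.length - 1)
      = pvRevW (c1.take d) ++ pvRevW (c1.drop d) := by
    have := rvLoop_window c1.length (c1.drop d) (pvRevW (c1.take d)) [] (by simp)
    have harith : d + (c1.length - d) - 1 = cs0.length - 1 := by
      rw [← hlen1]; omega
    simpa [hlen2, harith] using this
  -- the two reversed parts are the two slices of the rotation
  have hr1 : pvRevW (c1.take d) = pvRebuild (c1.take d) (v.drop (L - k)) := by
    rw [pvRevW, hftake, List.take_reverse, List.reverse_reverse]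
  have hr2 : pvRevW (c1.drop d) = pvRebuild (c1.drop d) (v.take (L - k)) := by
    rw [pvRevW, hfdrop, List.drop_reverse, List.reverse_reverse]
  have hlenr1 : (v.drop (L - k)).length = k := by
    rw [List.length_drop]; omega
  -- combine the two blocks into one rebuild over cs0
  have hcomb : pvRevW (c1.take d) ++ pvRevW (c1.drop d)
      = pvRebuild cs0 (v.drop (L - k) ++ v.take (L - k)) := by
    rw [hr1, hr2]
    have happ := pvRebuild_append (c1.take d) (c1.drop d) (v.drop (L - k) ++ v.take (L - k))
    rw [List.take_append_drop, hklen, List.drop_left' hlenr1,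
      pvRebuild_prefix (c1.take d) (v.drop (L - k)) (v.take (L - k))
        (le_of_eq (by rw [hklen, hlenr1]))] at happ
    rw [← happ]
    exact pvRebuild_pvRebuild cs0 v.reverse _
      (by rw [List.length_reverse, hv_def])
      (fun c hc => hall_v c (List.mem_reverse.mp hc))
  -- unfold B's definition and chain the steps
  show vowel_shift_alt text n = _
  unfold vowel_shift_alt
  rw [if_neg h0]
  simp only [← hcs0_def, htot, ← hv_def, ← hL_def, ← hk_def]
  rw [if_neg (by omega : ¬ L = 0), if_neg hk, h1, hm_eq]
  simp only [Nat.zero_add]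
  rw [h2, h3, hcomb]

-- ===== VERDICT (by name: the statement is the Claim_ definition above) =====
theorem vowel_shift_spec : Claim_equal_vowel_shift := by
  unfold Claim_equal_vowel_shift
  intro text n _
  unfold Spec_vowel_shift
  by_cases h0 : text.toList = [] ∨ n = 0
  · unfold vowel_shift vowel_shift_alt
    rw [if_pos h0, if_pos h0]
  · by_cases hv : text.toList.filter pvIsVowel = []
    · rw [A_novowel text n h0 hv]
      have htot : text.toList.foldl (fun a c => if pvIsVowel c then a + 1 else a) 0 = 0 := by
        simpa [hv] using count_foldl text.toList 0
      unfold vowel_shift_alt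
      rw [if_neg h0]
      simp [htot]
    · rw [A_eq_rebuild text n h0 hv]
      by_cases hk : (PySem.Int.mod n ((text.toList.filter pvIsVowel).length : Int)).toNat = 0
      · -- rotation by 0: both sides are the original text
        have htot : text.toList.foldl (fun a c => if pvIsVowel c then a + 1 else a) 0
            = (text.toList.filter pvIsVowel).length := by
          simpa using count_foldl text.toList 0
        have hLpos : 0 < (text.toList.filter pvIsVowel).length :=
          List.length_pos_iff.mpr hv
        rw [hk]
        simp only [Nat.sub_zero, List.drop_length, List.take_length, List.nil_append]
        rw [pvRebuild_self, String.ofList_toList]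
        unfold vowel_shift_alt
        rw [if_neg h0]
        simp only [htot]
        rw [if_neg (by omega), hk]
        simp
      · exact (B_eq_rebuild text n h0 hv hk).symm
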